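-- pv_equiv track=rewrite | github.com/Bsher22/card-inventory | data/beckett_xlsx_scraper.py | get_best_xlsx_url
-- ===== SOURCE A (Python) =====
-- from typing import Optional, List, Tuple
--
-- def get_best_xlsx_url(xlsx_urls: List[str], product: str, year: int) -> Optional[str]:
--     """
--     Select the best matching XLSX URL for a specific product and year.
--
--     Args:
--         xlsx_urls: List of found XLSX URLs
--         product: Product name (e.g., 'bowman-baseball')
--         year: Year
--
--     Returns:
--         Best matching URL or None
--     """
--     if not xlsx_urls:
--         return None
--
--     # If only one URL, return it
--     if len(xlsx_urls) == 1:
--         return xlsx_urls[0]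
--
--     # Try to find the most relevant one
--     year_str = str(year)
--
--     # Priority 1: URL contains both year and product-related keywords
--     product_keywords = product.replace('-', ' ').split()
--     for url in xlsx_urls:
--         url_lower = url.lower()
--         if year_str in url and all(kw in url_lower for kw in product_keywords):
--             return url
--
--     # Priority 2: URL contains year and "checklist"
--     for url in xlsx_urls:
--         url_lower = url.lower()
--         if year_str in url and 'checklist' in url_lower:
--             return url
--
--     # Priority 3: URL contains year
--     for url in xlsx_urls:
--         if year_str in url:
--             return url
--
--     # Fallback: return first URL
--     return xlsx_urls[0]
-- ===== SOURCE B (Python) =====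
-- from typing import Optional, List
--
--
-- def get_best_xlsx_url(xlsx_urls: List[str], product: str, year: int) -> Optional[str]:
--     """One-pass selection: rank each URL (1 best .. 4 worst) and keep the
--     earliest URL with the smallest rank."""
--     year_str = str(year)
--     keywords = product.replace('-', ' ').split()
--     best = None  # (rank, url)
--     for url in xlsx_urls:
--         url_lower = url.lower()
--         if year_str in url:
--             if all(kw in url_lower for kw in keywords):
--                 rank = 1
--             elif 'checklist' in url_lower:
--                 rank = 2
--             else:
--                 rank = 3
--         else:
--             rank = 4
--         if best is None or rank < best[0]:
--             best = (rank, url)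
--     return best[1] if best is not None else None
-- ===== Notes on version B (the rewrite author's own statement) =====
-- stated objective: simpler
-- what changed: Replaced A's three sequential priority scans over the whole list (plus the singleton shortcut) by a single pass that assigns each URL a rank 1-4 and keeps the earliest URL with the strictly smallest rank.
import Mathlib
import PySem

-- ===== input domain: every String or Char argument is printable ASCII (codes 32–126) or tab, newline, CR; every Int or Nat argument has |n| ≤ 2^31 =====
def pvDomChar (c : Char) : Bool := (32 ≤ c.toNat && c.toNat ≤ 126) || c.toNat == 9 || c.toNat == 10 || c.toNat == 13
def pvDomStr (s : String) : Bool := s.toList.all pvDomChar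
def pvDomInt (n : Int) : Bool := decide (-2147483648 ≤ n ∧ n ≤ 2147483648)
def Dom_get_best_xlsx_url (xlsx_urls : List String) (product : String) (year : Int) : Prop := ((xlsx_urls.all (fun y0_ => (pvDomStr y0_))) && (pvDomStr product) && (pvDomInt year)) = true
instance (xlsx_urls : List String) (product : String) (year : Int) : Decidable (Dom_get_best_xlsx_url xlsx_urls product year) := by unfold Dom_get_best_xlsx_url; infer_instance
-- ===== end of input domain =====

-- B replaces A's three sequential scans (plus singleton shortcut) by a single pass that
-- ranks each URL 1..4 and keeps the earliest URL with the smallest rank (objective: simpler).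


-- ===== PORT A =====
-- A-side helpers: the three loop conditions of A (year_str and keywords passed in)
def pvQ1 (ys : String) (kws : List String) (url : String) : Bool :=
  PySem.Str.isIn ys url && kws.all (fun kw => PySem.Str.isIn kw (PySem.Str.lower url))
def pvQ2 (ys : String) (url : String) : Bool :=
  PySem.Str.isIn ys url && PySem.Str.isIn "checklist" (PySem.Str.lower url)
def pvQ3 (ys : String) (url : String) : Bool :=
  PySem.Str.isIn ys url

def get_best_xlsx_url (xlsx_urls : List String) (product : String) (year : Int) : Option String :=
  if xlsx_urls = [] then none
  else if xlsx_urls.length = 1 then PySem.List.pyGet? xlsx_urls 0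
  else
    let year_str := PySem.Int.toStr year
    let product_keywords := PySem.Str.split₀ (PySem.Str.replace product "-" " ")
    match xlsx_urls.find? (pvQ1 year_str product_keywords) with
    | some url => some url
    | none =>
      match xlsx_urls.find? (pvQ2 year_str) with
      | some url => some url
      | none =>
        match xlsx_urls.find? (pvQ3 year_str) with
        | some url => some url
        | none => PySem.List.pyGet? xlsx_urls 0

-- ===== PORT B =====
-- the rank computed inside B's loop body
def pvRank (ys : String) (kws : List String) (url : String) : Nat :=
  let ul := PySem.Str.lower url
  if PySem.Str.isIn ys url then
    if kws.all (fun kw => PySem.Str.isIn kw ul) then 1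
    else if PySem.Str.isIn "checklist" ul then 2
    else 3
  else 4

-- one iteration of B's loop: replace `best` when it is None or the new rank is strictly smaller
def pvStep (ys : String) (kws : List String) (best : Option (Nat × String)) (url : String) :
    Option (Nat × String) :=
  let r := pvRank ys kws url
  match best with
  | none => some (r, url)
  | some (b, u) => if r < b then some (r, url) else some (b, u)

def get_best_xlsx_url_alt (xlsx_urls : List String) (product : String) (year : Int) : Option String :=
  let year_str := PySem.Int.toStr year
  let keywords := PySem.Str.split₀ (PySem.Str.replace product "-" " ")
  match xlsx_urls.foldl (pvStep year_str keywords) none with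
  | some (_, u) => some u
  | none => none

-- ===== PRECONDITION & SPEC =====
def Spec_get_best_xlsx_url (xlsx_urls : List String) (product : String) (year : Int) (out : Option String) : Prop := out = get_best_xlsx_url_alt xlsx_urls product year
instance (xlsx_urls : List String) (product : String) (year : Int) (out : Option String) : Decidable (Spec_get_best_xlsx_url xlsx_urls product year out) := by unfold Spec_get_best_xlsx_url; infer_instance

-- ===== CLAIM (what is proved, stated in full; the proofs are below) =====
def Claim_equal_get_best_xlsx_url : Prop := ∀ (xlsx_urls : List String) (product : String) (year : Int), Dom_get_best_xlsx_url xlsx_urls product year → Spec_get_best_xlsx_url xlsx_urls product year (get_best_xlsx_url xlsx_urls product year)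

-- ===== LEMMAS AND PROOFS =====

-- minimum rank of a list (5 = "empty"), the quantity B's loop tracks
def pvMinR (ys : String) (kws : List String) (ls : List String) : Nat :=
  ls.foldr (fun u m => min (pvRank ys kws u) m) 5

theorem pvMinR_cons (ys : String) (kws : List String) (x : String) (ls : List String) :
    pvMinR ys kws (x :: ls) = min (pvRank ys kws x) (pvMinR ys kws ls) := rfl

theorem pvRank_bounds (ys : String) (kws : List String) (v : String) :
    1 ≤ pvRank ys kws v ∧ pvRank ys kws v ≤ 4 := by
  simp only [pvRank]
  split_ifs <;> omega

theorem pvRank_q1 (ys : String) (kws : List String) (v : String) :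
    decide (pvRank ys kws v = 1) = pvQ1 ys kws v := by
  cases h1 : PySem.Str.isIn ys v <;>
    cases h2 : kws.all (fun kw => PySem.Str.isIn kw (PySem.Str.lower v)) <;>
    cases h3 : PySem.Str.isIn "checklist" (PySem.Str.lower v) <;>
    simp_all [pvRank, pvQ1]

theorem pvRank_q2 (ys : String) (kws : List String) (v : String)
    (h : pvRank ys kws v ≠ 1) : decide (pvRank ys kws v = 2) = pvQ2 ys v := by
  cases h1 : PySem.Str.isIn ys v <;>
    cases h2 : kws.all (fun kw => PySem.Str.isIn kw (PySem.Str.lower v)) <;>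
    cases h3 : PySem.Str.isIn "checklist" (PySem.Str.lower v) <;>
    simp_all [pvRank, pvQ2] <;> (try split_ifs) <;> omega

theorem pvRank_q3 (ys : String) (kws : List String) (v : String)
    (h : 3 ≤ pvRank ys kws v) : decide (pvRank ys kws v = 3) = pvQ3 ys v := by
  cases h1 : PySem.Str.isIn ys v <;>
    cases h2 : kws.all (fun kw => PySem.Str.isIn kw (PySem.Str.lower v)) <;>
    cases h3 : PySem.Str.isIn "checklist" (PySem.Str.lower v) <;>
    simp_all [pvRank, pvQ3] <;> (try split_ifs) <;> first | omega | simp_all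

theorem pvMinR_le_of_mem (ys : String) (kws : List String) {v : String} {ls : List String}
    (h : v ∈ ls) : pvMinR ys kws ls ≤ pvRank ys kws v := by
  induction ls with
  | nil => cases h
  | cons x t ih =>
    rw [pvMinR_cons]
    rcases List.mem_cons.mp h with rfl | h
    · omega
    · have := ih h; omega

theorem pvExists_rank_eq_minR (ys : String) (kws : List String) (ls : List String)
    (h : pvMinR ys kws ls ≤ 4) : ∃ v ∈ ls, pvRank ys kws v = pvMinR ys kws ls := by
  induction ls with
  | nil => simp [pvMinR] at h
  | cons x t ih =>
    rw [pvMinR_cons] at h ⊢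
    by_cases hx : pvRank ys kws x ≤ pvMinR ys kws t
    · exact ⟨x, List.mem_cons_self, by omega⟩
    · obtain ⟨v, hv, hr⟩ := ih (by omega)
      exact ⟨v, List.mem_cons_of_mem _ hv, by omega⟩

theorem pvFind?_congr {α : Type} (p q : α → Bool) (l : List α)
    (h : ∀ v ∈ l, p v = q v) : l.find? p = l.find? q := by
  induction l with
  | nil => rfl
  | cons x t ih =>
    have hx := h x List.mem_cons_self
    simp only [List.find?_cons, hx]
    cases q x
    · exact ih fun v hv => h v (List.mem_cons_of_mem _ hv)
    · rfl

-- A's chain of scans returns the first URL of minimal rank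
theorem pvChain_eq (ys : String) (kws : List String) (x : String) (ls : List String) :
    (match (x :: ls).find? (pvQ1 ys kws) with
     | some url => some url
     | none =>
       match (x :: ls).find? (pvQ2 ys) with
       | some url => some url
       | none =>
         match (x :: ls).find? (pvQ3 ys) with
         | some url => some url
         | none => some x) =
    some (((x :: ls).find?
      (fun v => decide (pvRank ys kws v = pvMinR ys kws (x :: ls)))).getD x) := by
  set l := x :: ls with hl
  have hm4 : pvMinR ys kws l ≤ 4 := by
    have := (pvRank_bounds ys kws x).2
    rw [hl, pvMinR_cons]; omega
  obtain ⟨w, hwmem, hw⟩ := pvExists_rank_eq_minR ys kws l hm4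
  have hm1 : 1 ≤ pvMinR ys kws l := by
    have := (pvRank_bounds ys kws w).1; omega
  cases hf1 : l.find? (pvQ1 ys kws) with
  | some u =>
    have hu : pvQ1 ys kws u = true := List.find?_some hf1
    have humem : u ∈ l := List.mem_of_find?_eq_some hf1
    have hru : pvRank ys kws u = 1 := by
      have := pvRank_q1 ys kws u; rw [hu] at this; simpa using this
    have hmle := pvMinR_le_of_mem ys kws humem
    have hm : pvMinR ys kws l = 1 := by omega
    have : l.find? (fun v => decide (pvRank ys kws v = pvMinR ys kws l)) = some u := by
      rw [hm, pvFind?_congr _ (pvQ1 ys kws) l (fun v _ => pvRank_q1 ys kws v)]; exact hf1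
    simp [this]
  | none =>
    have hn1 : ∀ v ∈ l, pvRank ys kws v ≠ 1 := by
      intro v hv he
      have := List.find?_eq_none.mp hf1 v hv
      have hq := pvRank_q1 ys kws v
      rw [he] at hq; simp at hq; exact this hq
    have hm2 : 2 ≤ pvMinR ys kws l := by
      have := hn1 w hwmem; have := (pvRank_bounds ys kws w).1; omega
    cases hf2 : l.find? (pvQ2 ys) with
    | some u =>
      have hu : pvQ2 ys u = true := List.find?_some hf2
      have humem : u ∈ l := List.mem_of_find?_eq_some hf2
      have hru : pvRank ys kws u = 2 := by
        have := pvRank_q2 ys kws u (hn1 u humem); rw [hu] at this; simpa using this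
      have hmle := pvMinR_le_of_mem ys kws humem
      have hm : pvMinR ys kws l = 2 := by omega
      have : l.find? (fun v => decide (pvRank ys kws v = pvMinR ys kws l)) = some u := by
        rw [hm, pvFind?_congr _ (pvQ2 ys) l (fun v hv => pvRank_q2 ys kws v (hn1 v hv))]
        exact hf2
      simp [this]
    | none =>
      have hn2 : ∀ v ∈ l, pvRank ys kws v ≠ 2 := by
        intro v hv he
        have := List.find?_eq_none.mp hf2 v hv
        have hq := pvRank_q2 ys kws v (hn1 v hv)
        rw [he] at hq; simp at hq; exact this hq
      have hge3 : ∀ v ∈ l, 3 ≤ pvRank ys kws v := by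
        intro v hv
        have := hn1 v hv; have := hn2 v hv; have := (pvRank_bounds ys kws v).1; omega
      have hm3 : 3 ≤ pvMinR ys kws l := by have := hge3 w hwmem; omega
      cases hf3 : l.find? (pvQ3 ys) with
      | some u =>
        have hu : pvQ3 ys u = true := List.find?_some hf3
        have humem : u ∈ l := List.mem_of_find?_eq_some hf3
        have hru : pvRank ys kws u = 3 := by
          have := pvRank_q3 ys kws u (hge3 u humem); rw [hu] at this; simpa using this
        have hmle := pvMinR_le_of_mem ys kws humem
        have hm : pvMinR ys kws l = 3 := by omega
        have : l.find? (fun v => decide (pvRank ys kws v = pvMinR ys kws l)) = some u := by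
          rw [hm, pvFind?_congr _ (pvQ3 ys) l (fun v hv => pvRank_q3 ys kws v (hge3 v hv))]
          exact hf3
        simp [this]
      | none =>
        have hn3 : ∀ v ∈ l, pvRank ys kws v ≠ 3 := by
          intro v hv he
          have := List.find?_eq_none.mp hf3 v hv
          have hq := pvRank_q3 ys kws v (hge3 v hv)
          rw [he] at hq; simp at hq; exact this hq
        have hrx : pvRank ys kws x = 4 := by
          have h1 := hge3 x List.mem_cons_self
          have h2 := hn3 x List.mem_cons_self
          have := (pvRank_bounds ys kws x).2; omega
        have hm : pvMinR ys kws l = 4 := by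
          have := hge3 w hwmem; have := hn3 w hwmem; omega
        have : l.find? (fun v => decide (pvRank ys kws v = pvMinR ys kws l)) = some x := by
          rw [hl, List.find?_cons, hm]
          simp [hrx]
        simp [this]

-- B's fold from a live best state computes the running minimum and the first URL attaining it
theorem pvFold_char (ys : String) (kws : List String) :
    ∀ (ls : List String) (b : Nat) (u : String), 1 ≤ b → b ≤ 5 →
    ls.foldl (pvStep ys kws) (some (b, u)) =
      some (min b (pvMinR ys kws ls),
        if pvMinR ys kws ls < b then
          (ls.find? (fun v => decide (pvRank ys kws v = pvMinR ys kws ls))).getD u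
        else u) := by
  intro ls
  induction ls with
  | nil =>
    intro b u h1 h5
    simp [pvMinR]
    omega
  | cons x t ih =>
    intro b u h1 h5
    have hrx := pvRank_bounds ys kws x
    rw [List.foldl_cons]
    show t.foldl (pvStep ys kws) (pvStep ys kws (some (b, u)) x) = _
    rw [pvMinR_cons]
    by_cases hlt : pvRank ys kws x < b
    · have hstep : pvStep ys kws (some (b, u)) x = some (pvRank ys kws x, x) := by
        simp [pvStep, hlt]
      rw [hstep, ih (pvRank ys kws x) x hrx.1 (by omega)]
      by_cases hm : pvMinR ys kws t < pvRank ys kws x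
      · have hmin1 : min b (min (pvRank ys kws x) (pvMinR ys kws t)) = pvMinR ys kws t := by omega
        have hmin2 : min (pvRank ys kws x) (pvMinR ys kws t) = pvMinR ys kws t := by omega
        have hcond : pvMinR ys kws t < b := by omega
        have hhead : (x :: t).find?
            (fun v => decide (pvRank ys kws v = min (pvRank ys kws x) (pvMinR ys kws t))) =
            t.find? (fun v => decide (pvRank ys kws v = pvMinR ys kws t)) := by
          rw [List.find?_cons, hmin2]
          simp [show pvRank ys kws x ≠ pvMinR ys kws t by omega]
        have hsome : (t.find? (fun v => decide (pvRank ys kws v = pvMinR ys kws t))).isSome := by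
          obtain ⟨v, hv, hr⟩ := pvExists_rank_eq_minR ys kws t (by omega)
          exact List.find?_isSome.mpr ⟨v, hv, by simp [hr]⟩
        obtain ⟨v, hv⟩ := Option.isSome_iff_exists.mp hsome
        simp [hm, hmin1, hcond, hhead, hv]
        omega
      · have hmin2 : min (pvRank ys kws x) (pvMinR ys kws t) = pvRank ys kws x := by omega
        have hhead : (x :: t).find?
            (fun v => decide (pvRank ys kws v = min (pvRank ys kws x) (pvMinR ys kws t))) =
            some x := by
          rw [List.find?_cons, hmin2]; simp
        simp [hm, hhead]
        omega
    · have hstep : pvStep ys kws (some (b, u)) x = some (b, u) := by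
        simp [pvStep, hlt]
      rw [hstep, ih b u h1 h5]
      by_cases hm : pvMinR ys kws t < b
      · have hmin1 : min b (min (pvRank ys kws x) (pvMinR ys kws t)) = pvMinR ys kws t := by omega
        have hmin0 : min b (pvMinR ys kws t) = pvMinR ys kws t := by omega
        have hmin2 : min (pvRank ys kws x) (pvMinR ys kws t) = pvMinR ys kws t := by omega
        have hcond : min (pvRank ys kws x) (pvMinR ys kws t) < b := by omega
        have hhead : (x :: t).find?
            (fun v => decide (pvRank ys kws v = min (pvRank ys kws x) (pvMinR ys kws t))) =
            t.find? (fun v => decide (pvRank ys kws v = pvMinR ys kws t)) := by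
          rw [List.find?_cons, hmin2]
          simp [show pvRank ys kws x ≠ pvMinR ys kws t by omega]
        simp [hm, hmin0, hmin1, hcond, hhead]
      · have : ¬ min (pvRank ys kws x) (pvMinR ys kws t) < b := by omega
        simp [hm, this]
        omega

-- ===== VERDICT (by name: the statement is the Claim_ definition above) =====
theorem get_best_xlsx_url_spec : Claim_equal_get_best_xlsx_url := by
  intro xlsx_urls product year _
  unfold Spec_get_best_xlsx_url get_best_xlsx_url get_best_xlsx_url_alt
  cases xlsx_urls with
  | nil => rfl
  | cons x ls =>
    cases ls with
    | nil => simp [pvStep, PySem.List.pyGet?, PySem.List.pyIdx?]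
    | cons y t =>
      set ys := PySem.Int.toStr year
      set kws := PySem.Str.split₀ (PySem.Str.replace product "-" " ")
      have hlen : ¬ (x :: y :: t).length = 1 := by simp
      simp only [if_neg (by simp : ¬ (x :: y :: t) = ([] : List String)), if_neg hlen]
      have hrx := pvRank_bounds ys kws x
      have hfold : (x :: y :: t).foldl (pvStep ys kws) none =
          (y :: t).foldl (pvStep ys kws) (some (pvRank ys kws x, x)) := by
        rw [List.foldl_cons]; rfl
      have hget : PySem.List.pyGet? (x :: y :: t) 0 = some x := by
        have h0 : (0:Int) ≤ (t.length:Int) + 1 := by positivity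
        simp [PySem.List.pyGet?, PySem.List.pyIdx?, h0]
      rw [hget, pvChain_eq ys kws x (y :: t), hfold,
        pvFold_char ys kws (y :: t) (pvRank ys kws x) x hrx.1 (by omega)]
      by_cases hm : pvMinR ys kws (y :: t) < pvRank ys kws x
      · have hm' : pvMinR ys kws (x :: y :: t) = pvMinR ys kws (y :: t) := by
          rw [pvMinR_cons]; omega
        have hhead : (x :: y :: t).find?
            (fun v => decide (pvRank ys kws v = pvMinR ys kws (x :: y :: t))) =
            (y :: t).find? (fun v => decide (pvRank ys kws v = pvMinR ys kws (y :: t))) := by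
          rw [List.find?_cons, hm']
          simp [show pvRank ys kws x ≠ pvMinR ys kws (y :: t) by omega]
        simp [hm, hhead]
      · have hm' : pvMinR ys kws (x :: y :: t) = pvRank ys kws x := by
          rw [pvMinR_cons]; omega
        have hhead : (x :: y :: t).find?
            (fun v => decide (pvRank ys kws v = pvMinR ys kws (x :: y :: t))) = some x := by
          rw [List.find?_cons, hm']; simp
        simp [hm, hhead]
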